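-- pv_equiv track=rewrite | github.com/Mauriciorieke/Earnings_scraper | earnings_scraper/financials.py | _deduplicate_by_period
-- ===== SOURCE A (Python) =====
-- def _deduplicate_by_period(values):
--     """Keep the most recently filed value for each fiscal period end date."""
--     by_period = {}
--     for v in values:
--         end = v.get("end")
--         if not end:
--             continue
--         existing = by_period.get(end)
--         if existing is None or v.get("filed", "") > existing.get("filed", ""):
--             by_period[end] = v
--     sorted_periods = sorted(by_period.items(), key=lambda x: x[0], reverse=True)
--     return [v for _, v in sorted_periods]
-- ===== SOURCE B (Python) =====
-- def _deduplicate_by_period(values):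
--     """Keep the most recently filed value for each fiscal period end date."""
--     ends = {v.get("end") for v in values if v.get("end")}
--     out = []
--     for e in sorted(ends, reverse=True):
--         best = None
--         for v in values:
--             if v.get("end") == e and (best is None or v.get("filed", "") > best.get("filed", "")):
--                 best = v
--         if best is not None:
--             out.append(best)
--     return out
-- ===== Notes on version B (the rewrite author's own statement) =====
-- stated objective: alternative
-- what changed: Replaces the dict-of-latest-filed accumulation followed by an items sort with a sort of the distinct period ends and an explicit per-end scan picking the max-filed value; no dictionary is maintained.
import Mathlib
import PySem

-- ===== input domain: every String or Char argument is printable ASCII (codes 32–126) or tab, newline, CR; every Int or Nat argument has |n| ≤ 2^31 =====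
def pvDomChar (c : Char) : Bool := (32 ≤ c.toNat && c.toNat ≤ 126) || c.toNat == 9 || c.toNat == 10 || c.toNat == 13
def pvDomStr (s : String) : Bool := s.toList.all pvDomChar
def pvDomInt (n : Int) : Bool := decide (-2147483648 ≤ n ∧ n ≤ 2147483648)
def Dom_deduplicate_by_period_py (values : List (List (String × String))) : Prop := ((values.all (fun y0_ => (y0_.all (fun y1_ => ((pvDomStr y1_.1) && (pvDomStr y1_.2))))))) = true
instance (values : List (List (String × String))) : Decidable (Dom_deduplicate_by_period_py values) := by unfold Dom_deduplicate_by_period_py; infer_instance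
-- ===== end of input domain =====

-- B replaces A's dict accumulation + items sort by sorting the distinct ends and scanning per end; alternative decomposition, same results.

-- shared primitive: v.get(k, dflt) on the record dict
def pvGetD (v : List (String × String)) (k dflt : String) : String :=
  PySem.Dict.getD (PySem.Dict.mk v) k dflt

-- v.get("end") with the falsy test collapsed: missing and "" both behave as ""
def pvEnd (v : List (String × String)) : String := pvGetD v "end" ""

def pvFiled (v : List (String × String)) : String := pvGetD v "filed" ""

-- ===== PORT A =====
def pvAStep (d : PySem.Dict String (List (String × String))) (v : List (String × String)) :
    PySem.Dict String (List (String × String)) :=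
  let e := pvEnd v
  if e = "" then d
  else
    match PySem.Dict.get? d e with
    | none => PySem.Dict.insert d e v
    | some existing => if pvFiled v > pvFiled existing then PySem.Dict.insert d e v else d

def deduplicate_by_period_py (values : List (List (String × String))) : List (List (String × String)) :=
  let by_period := values.foldl pvAStep PySem.Dict.empty
  let sorted_periods := PySem.List.sorted by_period.items (fun x => x.1) true
  sorted_periods.map (fun p => p.2)

-- ===== PORT B =====
-- inner scan: the best (max-filed, earliest on ties) value whose end equals e
def pvBestFor (values : List (List (String × String))) (e : String) :
    Option (List (String × String)) :=
  values.foldl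
    (fun best v =>
      if pvEnd v = e then
        match best with
        | none => some v
        | some b => if pvFiled v > pvFiled b then some v else best
      else best) none

def deduplicate_by_period_py_alt (values : List (List (String × String))) : List (List (String × String)) :=
  let ends : PySem.Set String :=
    PySem.Set.ofList (values.filterMap (fun v => if pvEnd v = "" then none else some (pvEnd v)))
  (PySem.List.sorted ends (fun e => e) true).foldl
    (fun out e =>
      match pvBestFor values e with
      | some b => out ++ [b]
      | none => out) []

-- ===== PRECONDITION & SPEC =====
def Spec_deduplicate_by_period_py (values : List (List (String × String))) (out : List (List (String × String))) : Prop := out = deduplicate_by_period_py_alt values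
instance (values : List (List (String × String))) (out : List (List (String × String))) : Decidable (Spec_deduplicate_by_period_py values out) := by unfold Spec_deduplicate_by_period_py; infer_instance

-- ===== CLAIM (what is proved, stated in full; the proofs are below) =====
def Claim_equal_deduplicate_by_period_py : Prop := ∀ (values : List (List (String × String))), Dom_deduplicate_by_period_py values → Spec_deduplicate_by_period_py values (deduplicate_by_period_py values)

-- ===== LEMMAS AND PROOFS =====

-- the truthy ends of the input, in order
def pvTEnds (values : List (List (String × String))) : List String :=
  values.filterMap (fun v => if pvEnd v = "" then none else some (pvEnd v))

theorem pvTEnds_ne_empty {values : List (List (String × String))} {k : String}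
    (h : k ∈ pvTEnds values) : k ≠ "" := by
  unfold pvTEnds at h
  rcases List.mem_filterMap.mp h with ⟨v, _, hv⟩
  by_cases he : pvEnd v = "" <;> simp [he] at hv
  subst hv; exact he

theorem pvAStep_keys (d : PySem.Dict String (List (String × String))) (v : List (String × String)) :
    (pvAStep d v).keys = if pvEnd v = "" then d.keys else PySem.Set.add d.keys (pvEnd v) := by
  unfold pvAStep
  by_cases he : pvEnd v = "" <;> simp only [he, if_true, if_false]
  cases hg : PySem.Dict.get? d (pvEnd v) with
  | none =>
      have hmem : pvEnd v ∉ d.keys := (PySem.Dict.get?_eq_none_iff_not_mem_keys _ _).mp hg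
      have hc : d.contains (pvEnd v) = false := by
        by_contra hcc
        have := (PySem.Dict.contains_iff_mem_keys d (pvEnd v)).mp
          (by revert hcc; cases d.contains (pvEnd v) <;> simp)
        exact hmem this
      simp [PySem.Dict.keys_insert_of_not_contains _ _ hc, PySem.Set.add_of_not_mem hmem]
  | some ex =>
      have hmem : pvEnd v ∈ d.keys := by
        by_contra hmm
        rw [(PySem.Dict.get?_eq_none_iff_not_mem_keys _ _).mpr hmm] at hg
        cases hg
      have hc : d.contains (pvEnd v) = true := (PySem.Dict.contains_iff_mem_keys _ _).mpr hmem
      by_cases hf : pvFiled v > pvFiled ex <;>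
        simp [hf, PySem.Dict.keys_insert_of_contains _ _ hc, PySem.Set.add_of_mem hmem]

theorem pvFold_keys (l : List (List (String × String)))
    (d : PySem.Dict String (List (String × String))) :
    (l.foldl pvAStep d).keys = PySem.Set.update d.keys (pvTEnds l) := by
  induction l generalizing d with
  | nil => simp [pvTEnds, PySem.Set.update_nil]
  | cons v l ih =>
      simp only [List.foldl_cons, ih]
      by_cases he : pvEnd v = ""
      · simp [pvTEnds, he, pvAStep_keys]
      · simp [pvTEnds, he, pvAStep_keys, PySem.Set.update_cons]

theorem pvFold_get? (l : List (List (String × String)))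
    (d : PySem.Dict String (List (String × String))) (e : String) (he : e ≠ "") :
    (l.foldl pvAStep d).get? e =
      l.foldl
        (fun best v =>
          if pvEnd v = e then
            match best with
            | none => some v
            | some b => if pvFiled v > pvFiled b then some v else best
          else best) (d.get? e) := by
  induction l generalizing d with
  | nil => rfl
  | cons v l ih =>
      simp only [List.foldl_cons, ih]
      congr 1
      by_cases hve : pvEnd v = ""
      · have hne2 : ¬ (pvEnd v = e) := by rw [hve]; exact fun h => he h.symm
        have h1 : pvAStep d v = d := by simp [pvAStep, hve]
        simp [h1, hne2]
      · by_cases heq : pvEnd v = e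
        · subst heq
          unfold pvAStep
          simp only [hve, if_false]
          cases hg : PySem.Dict.get? d (pvEnd v) with
          | none => simp [PySem.Dict.get?_insert_self]
          | some ex =>
              by_cases hf : pvFiled v > pvFiled ex <;>
                simp [hf, PySem.Dict.get?_insert_self, hg]
        · have hne : e ≠ pvEnd v := fun h => heq h.symm
          unfold pvAStep
          simp only [hve, if_false, heq]
          cases hg : PySem.Dict.get? d (pvEnd v) with
          | none => simp [PySem.Dict.get?_insert_of_ne _ _ hne]
          | some ex =>
              by_cases hf : pvFiled v > pvFiled ex <;>
                simp [hf, PySem.Dict.get?_insert_of_ne _ _ hne]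

-- B's outer loop appends exactly the per-end best values
theorem pvFoldl_best_map (values : List (List (String × String)))
    (dget : String -> List (String × String)) (S : List String)
    (init : List (List (String × String)))
    (h : forall e, e ∈ S -> pvBestFor values e = some (dget e)) :
    S.foldl (fun out e => match pvBestFor values e with
      | some b => out ++ [b]
      | none => out) init = init ++ S.map dget := by
  induction S generalizing init with
  | nil => simp
  | cons x S ih =>
      simp only [List.foldl_cons, h x (List.mem_cons_self), List.map_cons]
      rw [ih _ (fun y hy => h y (List.mem_cons_of_mem _ hy))]
      simp

-- ===== VERDICT (by name: the statement is the Claim_ definition above) =====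
theorem deduplicate_by_period_py_spec : Claim_equal_deduplicate_by_period_py := by
  intro values _
  unfold Spec_deduplicate_by_period_py deduplicate_by_period_py deduplicate_by_period_py_alt
  dsimp only
  set d := values.foldl pvAStep PySem.Dict.empty with hd
  have hkeys : d.keys = PySem.Set.ofList (pvTEnds values) := by
    rw [hd, pvFold_keys]
    simp [PySem.Dict.keys_empty, PySem.Set.update_nil_left]
  have hnd : d.keys.Nodup := by rw [hkeys]; exact PySem.Set.nodup_ofList _
  have hget : forall e : String, e ≠ "" -> d.get? e = pvBestFor values e := by
    intro e he
    rw [hd, pvFold_get? _ _ _ he]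
    rfl
  set S := PySem.List.sorted d.keys (fun e => e) true with hS
  have hends : PySem.Set.ofList (values.filterMap (fun v => if pvEnd v = "" then none else some (pvEnd v))) = d.keys := by
    rw [hkeys]; rfl
  have hSnd : S.Nodup := ((PySem.List.sorted_perm d.keys (fun e => e) true).nodup_iff).mpr hnd
  have hSstrict : S.Pairwise (fun a b => b < a) := by
    have h1 : S.Pairwise (fun a b : String => b ≤ a) :=
      PySem.List.sorted_pairwise_rev d.keys (fun e => e)
    have h2 : S.Pairwise (fun a b : String => a ≠ b) := hSnd
    exact (h1.and h2).imp (fun h => lt_of_le_of_ne h.1 (Ne.symm h.2))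
  have hitems : PySem.List.sorted d.items (fun x => x.1) true =
      S.map (fun k => (k, d.getD k [])) := by
    apply PySem.List.sorted_rev_eq_of_perm_of_pairwise_gt
    · have hperm : S.Perm d.keys := PySem.List.sorted_perm d.keys (fun e => e) true
      have := hperm.map (fun k => (k, d.getD k []))
      rw [← PySem.Dict.items_eq_map_keys d hnd []] at this
      exact this
    · rw [List.pairwise_map]
      exact hSstrict
  have hbest : forall e, e ∈ S -> pvBestFor values e = some (d.getD e []) := by
    intro e heS
    have heK : e ∈ d.keys := (PySem.List.mem_sorted d.keys (fun e => e) true e).mp heS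
    have hene : e ≠ "" := by
      rw [hkeys] at heK
      exact pvTEnds_ne_empty ((PySem.Set.mem_ofList _ _).mp heK)
    cases hg : d.get? e with
    | none => exact absurd ((PySem.Dict.get?_eq_none_iff_not_mem_keys _ _).mp hg) (by simp [heK])
    | some b =>
        rw [← hget e hene, hg]
        simp [PySem.Dict.getD_eq_get?_getD, hg]
  rw [hends, ← hS, hitems, List.map_map]
  have hB := pvFoldl_best_map values (fun e => d.getD e []) S [] hbest
  exact Eq.trans (by simp [Function.comp]) hB.symm
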